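-- pv_equiv track=rewrite | github.com/danishmustafa86/Calico-Competitions | Calico Competition 2024/3 The Case of the Missing Book/pro.py | solve
-- ===== SOURCE A (Python) =====
-- def solve(B: int, N: int, S: list) -> int:
--     min_height = min(S)
--     max_height = max(S)
--
--     best_height = None
--     min_danger = 100000
--     min_cost = 100000
--
--     for h in range(min_height, max_height + 1):
--         danger = sum(abs(h - si) for si in S)
--         cost = sum(h - si for si in S if h > si)
--
--         # Alternative cost calculation:
--         # cost = sum(max(0, h - si) for si in S)
--
--         if cost <= B:
--             if danger < min_danger or (danger == min_danger and cost < min_cost):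
--                 best_height = h
--                 min_danger = danger
--                 min_cost = cost
--
--     return best_height
-- ===== SOURCE B (Python) =====
-- def solve(B: int, N: int, S: list) -> int:
--     lo = min(S)
--     hi = max(S)
--     n = len(S)
--     freq = {}
--     for s in S:
--         freq[s] = freq.get(s, 0) + 1
--     best_height = None
--     min_danger = 100000
--     min_cost = 100000
--     c = 0                             # number of elements <= h - 1
--     danger = sum(s - lo for s in S)   # sum |h - s| at h = lo
--     cost = 0                          # sum of (h - s) over s < h, at h = lo
--     for h in range(lo, hi + 1):
--         if cost <= B and (danger < min_danger or (danger == min_danger and cost < min_cost)):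
--             best_height = h
--             min_danger = danger
--             min_cost = cost
--         c += freq.get(h, 0)
--         danger += 2 * c - n
--         cost += c
--     return best_height
-- ===== Notes on version B (the rewrite author's own statement) =====
-- stated objective: faster
-- what changed: Instead of recomputing danger and cost from scratch for every candidate height (sum over all N elements per height), B builds a frequency dictionary once and sweeps the heights while updating danger, cost and the count of elements below the current height incrementally in O(1) per height.
import Mathlib
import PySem

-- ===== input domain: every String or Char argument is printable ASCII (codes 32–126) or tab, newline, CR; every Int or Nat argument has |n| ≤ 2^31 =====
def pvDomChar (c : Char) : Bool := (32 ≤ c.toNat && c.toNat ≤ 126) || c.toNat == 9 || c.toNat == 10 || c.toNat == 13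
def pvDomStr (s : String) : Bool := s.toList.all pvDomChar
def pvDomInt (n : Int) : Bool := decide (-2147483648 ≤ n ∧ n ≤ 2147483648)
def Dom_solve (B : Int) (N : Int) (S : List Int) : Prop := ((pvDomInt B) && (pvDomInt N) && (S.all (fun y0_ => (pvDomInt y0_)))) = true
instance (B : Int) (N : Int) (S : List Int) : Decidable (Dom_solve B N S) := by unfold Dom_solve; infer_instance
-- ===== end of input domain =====

-- B replaces A's per-height recomputation of danger/cost (O((max-min)*N)) by an
-- incremental sweep with a frequency dictionary (O(N + (max-min))); same return value.

-- ===== PORT A =====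
-- loop body of A's 'for h in range(min_height, max_height+1)'
def solveBodyA (B : Int) (S : List Int) (st : Option Int × Int × Int) (h : Int) :
    Option Int × Int × Int :=
  let danger := (S.map (fun si => |h - si|)).sum
  let cost := ((S.filter (fun si => decide (si < h))).map (fun si => h - si)).sum
  if cost ≤ B then
    if danger < st.2.1 ∨ (danger = st.2.1 ∧ cost < st.2.2) then (some h, danger, cost)
    else st
  else st

def solve (B : Int) (N : Int) (S : List Int) : Option Int :=
  match PySem.List.min? S (fun x => x), PySem.List.max? S (fun x => x) with
  | some lo, some hi =>
      ((PySem.List.pyRange lo (hi + 1) 1).foldl (solveBodyA B S) (none, 100000, 100000)).1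
  | _, _ => none   -- unreachable: Python's min/max raise on empty S (outside Pre_)

-- ===== PORT B =====
-- loop body of B's sweep; state = (best_height, min_danger, min_cost, c, danger, cost)
def solveBodyB (B : Int) (n : Int) (freq : PySem.Dict Int Int)
    (st : Option Int × Int × Int × Int × Int × Int) (h : Int) :
    Option Int × Int × Int × Int × Int × Int :=
  let best := st.1; let bd := st.2.1; let bc := st.2.2.1
  let c := st.2.2.2.1; let danger := st.2.2.2.2.1; let cost := st.2.2.2.2.2
  let tri :=
    if cost ≤ B ∧ (danger < bd ∨ (danger = bd ∧ cost < bc)) then (some h, danger, cost)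
    else (best, bd, bc)
  let c' := c + freq.getD h 0
  (tri.1, tri.2.1, tri.2.2, c', danger + (2 * c' - n), cost + c')

def solve_alt (B : Int) (N : Int) (S : List Int) : Option Int :=
  match PySem.List.min? S (fun x => x) with
  | none => none   -- unreachable: Python's min raises on empty S (outside Pre_)
  | some lo =>
    match PySem.List.max? S (fun x => x) with
    | none => none
    | some hi =>
      let n : Int := S.length
      let freq := S.foldl (fun d s => d.insert s (d.getD s 0 + 1)) PySem.Dict.empty
      let danger0 := (S.map (fun s => s - lo)).sum
      ((PySem.List.pyRange lo (hi + 1) 1).foldl (solveBodyB B n freq)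
        (none, 100000, 100000, 0, danger0, 0)).1

-- ===== PRECONDITION & SPEC =====
-- Pre_ excludes only the empty list, on which A's min() raises ValueError.
def Pre_solve (B : Int) (N : Int) (S : List Int) : Prop := S ≠ []
instance (B : Int) (N : Int) (S : List Int) : Decidable (Pre_solve B N S) := by
  unfold Pre_solve; infer_instance
def pvWitness_solve : Int × Int × List Int := (5, 3, [1, 4, 2])

def Spec_solve (B : Int) (N : Int) (S : List Int) (out : Option Int) : Prop := out = solve_alt B N S
instance (B : Int) (N : Int) (S : List Int) (out : Option Int) : Decidable (Spec_solve B N S out) := by unfold Spec_solve; infer_instance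

-- ===== CLAIM (what is proved, stated in full; the proofs are below) =====
def Claim_equal_solve : Prop := ∀ (B : Int) (N : Int) (S : List Int), Dom_solve B N S → Pre_solve B N S → Spec_solve B N S (solve B N S)

-- ===== LEMMAS AND PROOFS =====

def DangA (S : List Int) (h : Int) : Int := (S.map (fun si => |h - si|)).sum
def CostA (S : List Int) (h : Int) : Int :=
  ((S.filter (fun si => decide (si < h))).map (fun si => h - si)).sum
def CntLE (S : List Int) (h : Int) : Int := (S.countP (fun si => decide (si ≤ h)) : Int)

lemma dang_step (S : List Int) (h : Int) :
    DangA S (h + 1) = DangA S h + (2 * CntLE S h - S.length) := by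
  induction S with
  | nil => simp [DangA, CntLE]
  | cons x t ih =>
    have hx : |h + 1 - x| = |h - x| + (if x ≤ h then (1 : Int) else -1) := by
      by_cases hc : x ≤ h
      · rw [if_pos hc, abs_of_nonneg (by omega : (0 : Int) ≤ h + 1 - x),
          abs_of_nonneg (by omega : (0 : Int) ≤ h - x)]
        ring
      · rw [if_neg hc, abs_of_nonpos (by omega : h + 1 - x ≤ 0),
          abs_of_nonpos (by omega : h - x ≤ 0)]
        ring
    simp only [DangA, CntLE, List.map_cons, List.sum_cons, List.countP_cons,
      List.length_cons] at ih ⊢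
    rw [hx, ih]
    by_cases hc : x ≤ h <;> simp [hc] <;> push_cast <;> omega

lemma costA_eq (S : List Int) (h : Int) :
    CostA S h = (S.map (fun si => if si < h then h - si else 0)).sum := by
  induction S with
  | nil => simp [CostA]
  | cons x t ih =>
    simp only [CostA, List.filter_cons, List.map_cons, List.sum_cons] at ih ⊢
    by_cases hc : x < h
    · simp [hc, ih]
    · simp [hc, ih]

lemma cost_step (S : List Int) (h : Int) :
    CostA S (h + 1) = CostA S h + CntLE S h := by
  rw [costA_eq, costA_eq]
  induction S with
  | nil => simp [CntLE]
  | cons x t ih =>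
    simp only [CntLE, List.map_cons, List.sum_cons, List.countP_cons] at ih ⊢
    have hx : (if x < h + 1 then h + 1 - x else 0)
        = (if x < h then h - x else 0) + (if x ≤ h then (1 : Int) else 0) := by
      by_cases h1 : x ≤ h
      · by_cases h2 : x < h <;>
          simp [h1, h2, show x < h + 1 by omega] <;> omega
      · simp [h1, show ¬ x < h + 1 by omega, show ¬ x < h by omega]
    rw [hx, ih]
    by_cases h1 : x ≤ h <;> simp [h1] <;> push_cast <;> ring

lemma cnt_step (S : List Int) (h : Int) :
    CntLE S (h - 1) + (S.count h : Int) = CntLE S h := by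
  induction S with
  | nil => simp [CntLE]
  | cons x t ih =>
    unfold CntLE at ih ⊢
    rw [List.countP_cons, List.countP_cons, List.count_cons]
    by_cases hx : x = h
    · rw [if_neg (by simp only [hx, decide_eq_true_eq]; omega),
        if_pos (by simp only [hx, beq_self_eq_true]),
        if_pos (by simp only [hx, decide_eq_true_eq]; omega)]
      push_cast at ih ⊢
      omega
    · by_cases h1 : x ≤ h - 1
      · rw [if_pos (by simp only [decide_eq_true_eq]; omega),
          if_neg (by simp only [beq_iff_eq]; exact hx),
          if_pos (by simp only [decide_eq_true_eq]; omega)]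
        push_cast at ih ⊢
        omega
      · rw [if_neg (by simp only [decide_eq_true_eq]; omega),
          if_neg (by simp only [beq_iff_eq]; exact hx),
          if_neg (by simp only [decide_eq_true_eq]; omega)]
        push_cast at ih ⊢
        omega

lemma freq_eq (S : List Int) :
    S.foldl (fun d s => d.insert s (d.getD s 0 + 1)) PySem.Dict.empty = PySem.Dict.counter S :=
  PySem.Dict.foldl_insert_getD_add_one_eq_counter S

-- one step of B's sweep body equals one step of A's body, carrying the invariant forward
lemma body_step (B : Int) (S : List Int) (h : Int) (best : Option Int) (bd bc : Int) :
    solveBodyB B (S.length : Int) (PySem.Dict.counter S)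
      (best, bd, bc, CntLE S (h - 1), DangA S h, CostA S h) h =
    ((solveBodyA B S (best, bd, bc) h).1, (solveBodyA B S (best, bd, bc) h).2.1,
      (solveBodyA B S (best, bd, bc) h).2.2, CntLE S h, DangA S (h + 1), CostA S (h + 1)) := by
  have hcnt : CntLE S (h - 1) + (PySem.Dict.counter S).getD h 0 = CntLE S h := by
    rw [PySem.Dict.getD_counter]
    exact cnt_step S h
  have ed : (S.map (fun si => |h - si|)).sum = DangA S h := rfl
  have ec : ((S.filter (fun si => decide (si < h))).map (fun si => h - si)).sum = CostA S h := rfl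
  simp only [solveBodyB, solveBodyA, ed, ec, hcnt, dang_step, cost_step]
  by_cases h1 : CostA S h ≤ B
  · by_cases h2 : DangA S h < bd ∨ (DangA S h = bd ∧ CostA S h < bc)
    · simp [h1, h2]
    · simp [h1, h2]
  · simp [h1]

lemma loop_eq (B : Int) (S : List Int) :
    ∀ (k : Nat) (h b : Int), (b - h).toNat = k →
    ∀ (best : Option Int) (bd bc : Int),
    (((PySem.List.pyRange h b 1).foldl (solveBodyB B (S.length : Int) (PySem.Dict.counter S))
        (best, bd, bc, CntLE S (h - 1), DangA S h, CostA S h)).1,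
     ((PySem.List.pyRange h b 1).foldl (solveBodyB B (S.length : Int) (PySem.Dict.counter S))
        (best, bd, bc, CntLE S (h - 1), DangA S h, CostA S h)).2.1,
     ((PySem.List.pyRange h b 1).foldl (solveBodyB B (S.length : Int) (PySem.Dict.counter S))
        (best, bd, bc, CntLE S (h - 1), DangA S h, CostA S h)).2.2.1) =
    (PySem.List.pyRange h b 1).foldl (solveBodyA B S) (best, bd, bc) := by
  intro k
  induction k with
  | zero =>
    intro h b hk best bd bc
    have hba : b ≤ h := by omega
    simp [PySem.List.pyRange_one_eq_nil hba]
  | succ k ih =>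
    intro h b hk best bd bc
    by_cases hba : h < b
    · rw [PySem.List.pyRange_one_cons hba]
      simp only [List.foldl_cons, body_step]
      have hk2 : (b - (h + 1)).toNat = k := by omega
      have hsh : h + 1 - 1 = h := by omega
      have := ih (h + 1) b hk2 (solveBodyA B S (best, bd, bc) h).1
        (solveBodyA B S (best, bd, bc) h).2.1 (solveBodyA B S (best, bd, bc) h).2.2
      rw [hsh] at this
      rw [this]
    · have hle : b ≤ h := by omega
      simp [PySem.List.pyRange_one_eq_nil hle]

lemma dang_init (S : List Int) (lo : Int) (hlo : ∀ s ∈ S, lo ≤ s) :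
    (S.map (fun s => s - lo)).sum = DangA S lo := by
  induction S with
  | nil => simp [DangA]
  | cons x t ih =>
    have hx : lo ≤ x := hlo x (by simp)
    have ht := ih (fun s hs => hlo s (by simp [hs]))
    simp only [DangA, List.map_cons, List.sum_cons] at ht ⊢
    rw [ht, abs_of_nonpos (by omega : lo - x ≤ 0)]
    ring

lemma cost_init (S : List Int) (lo : Int) (hlo : ∀ s ∈ S, lo ≤ s) : CostA S lo = 0 := by
  have hf : S.filter (fun si => decide (si < lo)) = [] := by
    apply List.filter_eq_nil_iff.mpr
    intro s hs
    have h2 := hlo s hs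
    simp only [decide_eq_true_eq]
    omega
  simp [CostA, hf]

lemma cnt_init (S : List Int) (lo : Int) (hlo : ∀ s ∈ S, lo ≤ s) : CntLE S (lo - 1) = 0 := by
  have hc : S.countP (fun si => decide (si ≤ lo - 1)) = 0 := by
    apply List.countP_eq_zero.mpr
    intro s hs
    have h2 := hlo s hs
    simp only [decide_eq_true_eq]
    omega
  unfold CntLE
  rw [hc]
  simp

-- ===== VERDICT (by name: the statement is the Claim_ definition above) =====
theorem solve_spec : Claim_equal_solve := by
  intro B N S _ hpre
  unfold Spec_solve solve solve_alt
  cases hmin : PySem.List.min? S (fun x => x) with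
  | none => exact absurd ((PySem.List.min?_eq_none_iff S (fun x => x)).mp hmin) hpre
  | some lo =>
    cases hmax : PySem.List.max? S (fun x => x) with
    | none => exact absurd ((PySem.List.max?_eq_none_iff S (fun x => x)).mp hmax) hpre
    | some hi =>
      have hlo : ∀ s ∈ S, lo ≤ s := fun s hs => PySem.List.min?_isMin hmin s hs
      simp only [freq_eq]
      rw [dang_init S lo hlo]
      rw [show ((none : Option Int), (100000 : Int), (100000 : Int), (0 : Int), DangA S lo, (0 : Int))
            = (none, 100000, 100000, CntLE S (lo - 1), DangA S lo, CostA S lo) by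
        rw [cnt_init S lo hlo, cost_init S lo hlo]]
      exact (congrArg (fun p => p.1)
        (loop_eq B S ((hi + 1 - lo).toNat) lo (hi + 1) rfl none 100000 100000)).symm
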